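-- pv_equiv track=rewrite | github.com/z3r0privacy/AdventOfCode2024 | day06.py | get_new_pos
-- ===== SOURCE A (Python) =====
-- def turn_right(curr_dir:tuple[int,int]) -> tuple[int,int]:
--     if curr_dir == (0, -1): return (1,0)
--     if curr_dir == (1, 0): return (0, 1)
--     if curr_dir == (0, 1): return (-1, 0)
--     if curr_dir == (-1, 0): return (0, -1)
--     raise ValueError()
--
-- def get_new_pos(map:list[list[chr]], curr_pos:tuple[int,int], curr_dir:tuple[int, int]) -> tuple[tuple[int, int],tuple[int, int]]:
--     new_pos = (curr_pos[0]+curr_dir[0], curr_pos[1]+curr_dir[1])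
--     if new_pos[1] < 0 or new_pos[1] >= len(map) or new_pos[0] < 0 or new_pos[0] >= len(map[new_pos[1]]):
--         return None, None
--     if map[new_pos[1]][new_pos[0]] == "#":
--         new_dir = turn_right(curr_dir)
--         return get_new_pos(map, curr_pos, new_dir)
--     return new_pos, curr_dir
-- ===== SOURCE B (Python) =====
-- def rot(d):
--     return (-d[1], d[0])
--
-- def get_new_pos(map, curr_pos, curr_dir):
--     dirs = [curr_dir, rot(curr_dir), rot(rot(curr_dir)), rot(rot(rot(curr_dir)))]
--     def blocked(d):
--         ny = curr_pos[1] + d[1]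
--         nx = curr_pos[0] + d[0]
--         return 0 <= ny < len(map) and 0 <= nx < len(map[ny]) and map[ny][nx] == "#"
--     d = next(dd for dd in dirs if not blocked(dd))
--     nx, ny = curr_pos[0] + d[0], curr_pos[1] + d[1]
--     if ny < 0 or ny >= len(map) or nx < 0 or nx >= len(map[ny]):
--         return None, None
--     return (nx, ny), d
-- ===== Notes on version B (the rewrite author's own statement) =====
-- stated objective: alternative
-- what changed: Replaces A's recursion through turn_right's if-chain by precomputing the four right-rotations with the closed formula (x,y)->(-y,x) and selecting the first candidate direction whose target cell is not '#', then doing a single bounds check.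
import Mathlib
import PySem

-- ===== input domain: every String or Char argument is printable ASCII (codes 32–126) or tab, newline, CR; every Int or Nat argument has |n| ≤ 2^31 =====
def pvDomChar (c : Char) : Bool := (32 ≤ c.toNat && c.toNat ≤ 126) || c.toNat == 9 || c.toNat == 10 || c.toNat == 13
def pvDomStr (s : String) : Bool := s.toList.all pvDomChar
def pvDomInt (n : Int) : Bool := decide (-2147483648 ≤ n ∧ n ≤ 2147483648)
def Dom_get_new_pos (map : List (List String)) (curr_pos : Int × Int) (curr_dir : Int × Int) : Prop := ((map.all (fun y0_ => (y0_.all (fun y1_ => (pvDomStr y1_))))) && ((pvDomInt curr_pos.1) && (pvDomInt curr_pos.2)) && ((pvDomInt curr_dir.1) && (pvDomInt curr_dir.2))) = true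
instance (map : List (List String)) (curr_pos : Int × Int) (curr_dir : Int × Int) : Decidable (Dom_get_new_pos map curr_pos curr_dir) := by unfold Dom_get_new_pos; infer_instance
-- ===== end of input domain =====

-- B replaces A's recursion + turn_right if-chain by a first-match over the four
-- precomputed right-rotations (alternative decomposition, same cost).
-- Equivalence is about the return value on Pre_ (where A returns normally).

-- ===== PORT A =====
-- literal if-chain of A's turn_right; `none` = ValueError
def turn_right (curr_dir : Int × Int) : Option (Int × Int) :=
  if curr_dir = ((0 : Int), (-1 : Int)) then some (1, 0)
  else if curr_dir = ((1 : Int), (0 : Int)) then some (0, 1)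
  else if curr_dir = ((0 : Int), (1 : Int)) then some (-1, 0)
  else if curr_dir = ((-1 : Int), (0 : Int)) then some (0, -1)
  else none

-- fuel only makes A's unbounded recursion total; inside Pre_ it never runs out
-- (the recursion visits at most the 4 distinct directions). (none, none) on
-- fuel exhaustion / ValueError happens only outside Pre_.
def get_new_pos_fuel : Nat → List (List String) → Int × Int → Int × Int → (Option (Int × Int)) × (Option (Int × Int))
  | 0, _, _, _ => (none, none)
  | n + 1, map, curr_pos, curr_dir =>
    let new_pos : Int × Int := (curr_pos.1 + curr_dir.1, curr_pos.2 + curr_dir.2)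
    if new_pos.2 < 0 ∨ (map.length : Int) ≤ new_pos.2 ∨ new_pos.1 < 0 ∨
        ((map.getD new_pos.2.toNat []).length : Int) ≤ new_pos.1 then (none, none)
    else if (map.getD new_pos.2.toNat []).getD new_pos.1.toNat "" = "#" then
      match turn_right curr_dir with
      | some new_dir => get_new_pos_fuel n map curr_pos new_dir
      | none => (none, none)
    else (some new_pos, some curr_dir)

def get_new_pos (map : List (List String)) (curr_pos : Int × Int) (curr_dir : Int × Int) : (Option (Int × Int)) × (Option (Int × Int)) :=
  get_new_pos_fuel 4 map curr_pos curr_dir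

-- ===== PORT B =====
def rot (d : Int × Int) : Int × Int := (-d.2, d.1)

def blockedB (map : List (List String)) (curr_pos : Int × Int) (d : Int × Int) : Bool :=
  let ny := curr_pos.2 + d.2
  let nx := curr_pos.1 + d.1
  decide (0 ≤ ny) && decide (ny < (map.length : Int)) && decide (0 ≤ nx) &&
    decide (nx < ((map.getD ny.toNat []).length : Int)) &&
    decide ((map.getD ny.toNat []).getD nx.toNat "" = "#")

-- `none` from find? = Source B's StopIteration (all four candidates blocked); outside Pre_
def get_new_pos_alt (map : List (List String)) (curr_pos : Int × Int) (curr_dir : Int × Int) : (Option (Int × Int)) × (Option (Int × Int)) :=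
  let dirs := [curr_dir, rot curr_dir, rot (rot curr_dir), rot (rot (rot curr_dir))]
  match dirs.find? (fun dd => !blockedB map curr_pos dd) with
  | none => (none, none)
  | some d =>
    let nx := curr_pos.1 + d.1
    let ny := curr_pos.2 + d.2
    if ny < 0 ∨ (map.length : Int) ≤ ny ∨ nx < 0 ∨
        ((map.getD ny.toNat []).length : Int) ≤ nx then (none, none)
    else (some (nx, ny), some d)

-- ===== PRECONDITION & SPEC =====
-- Pre_ excludes exactly the inputs on which A does not return a value: the step cell
-- is '#' and curr_dir is not one of the four unit directions (ValueError), or all four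
-- rotations are blocked by '#' (unbounded recursion / RecursionError).
def Pre_get_new_pos (map : List (List String)) (curr_pos : Int × Int) (curr_dir : Int × Int) : Prop :=
  blockedB map curr_pos curr_dir = false ∨
  ((curr_dir = ((0 : Int), (-1 : Int)) ∨ curr_dir = ((1 : Int), (0 : Int)) ∨
    curr_dir = ((0 : Int), (1 : Int)) ∨ curr_dir = ((-1 : Int), (0 : Int))) ∧
   ¬(blockedB map curr_pos curr_dir = true ∧ blockedB map curr_pos (rot curr_dir) = true ∧
     blockedB map curr_pos (rot (rot curr_dir)) = true ∧
     blockedB map curr_pos (rot (rot (rot curr_dir))) = true))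
instance (map : List (List String)) (curr_pos : Int × Int) (curr_dir : Int × Int) : Decidable (Pre_get_new_pos map curr_pos curr_dir) := by unfold Pre_get_new_pos; infer_instance

def pvWitness_get_new_pos : List (List String) × (Int × Int) × (Int × Int) :=
  ([[".", "."], [".", "#"]], (0, 0), (1, 0))

def Spec_get_new_pos (map : List (List String)) (curr_pos : Int × Int) (curr_dir : Int × Int) (out : (Option (Int × Int)) × (Option (Int × Int))) : Prop := out = get_new_pos_alt map curr_pos curr_dir
instance (map : List (List String)) (curr_pos : Int × Int) (curr_dir : Int × Int) (out : (Option (Int × Int)) × (Option (Int × Int))) : Decidable (Spec_get_new_pos map curr_pos curr_dir out) := by unfold Spec_get_new_pos; infer_instance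

-- ===== CLAIM (what is proved, stated in full; the proofs are below) =====
def Claim_equal_get_new_pos : Prop := ∀ (map : List (List String)) (curr_pos : Int × Int) (curr_dir : Int × Int), Dom_get_new_pos map curr_pos curr_dir → Pre_get_new_pos map curr_pos curr_dir → Spec_get_new_pos map curr_pos curr_dir (get_new_pos map curr_pos curr_dir)

-- ===== LEMMAS AND PROOFS =====

-- the common "finish" step both programs take at the first unblocked direction
def finish (map : List (List String)) (curr_pos : Int × Int) (d : Int × Int) : (Option (Int × Int)) × (Option (Int × Int)) :=
  if curr_pos.2 + d.2 < 0 ∨ (map.length : Int) ≤ curr_pos.2 + d.2 ∨ curr_pos.1 + d.1 < 0 ∨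
      ((map.getD (curr_pos.2 + d.2).toNat []).length : Int) ≤ curr_pos.1 + d.1 then (none, none)
  else (some (curr_pos.1 + d.1, curr_pos.2 + d.2), some d)

lemma fuel_notblocked (n : Nat) (map : List (List String)) (p d : Int × Int)
    (h : blockedB map p d = false) :
    get_new_pos_fuel (n + 1) map p d = finish map p d := by
  simp only [get_new_pos_fuel, finish]
  split_ifs with hoob hcell
  · rfl
  · exfalso
    simp only [blockedB, Bool.and_eq_false_iff, decide_eq_false_iff_not, not_lt, not_le] at h
    push Not at hoob
    rcases h with ((((h | h) | h) | h) | h)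
    · omega
    · omega
    · omega
    · omega
    · exact h hcell
  · rfl

lemma fuel_blocked (n : Nat) (map : List (List String)) (p d nd : Int × Int)
    (h : blockedB map p d = true) (htr : turn_right d = some nd) :
    get_new_pos_fuel (n + 1) map p d = get_new_pos_fuel n map p nd := by
  simp only [blockedB, Bool.and_eq_true, decide_eq_true_eq] at h
  obtain ⟨⟨⟨⟨h1, h2⟩, h3⟩, h4⟩, h5⟩ := h
  simp only [get_new_pos_fuel]
  rw [if_neg (by omega), if_pos h5, htr]

lemma turn_right_rot (d : Int × Int)
    (h : d = ((0 : Int), (-1 : Int)) ∨ d = ((1 : Int), (0 : Int)) ∨ d = ((0 : Int), (1 : Int)) ∨ d = ((-1 : Int), (0 : Int))) :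
    turn_right d = some (rot d) := by
  rcases h with h | h | h | h <;> subst h <;> decide

lemma rot_valid (d : Int × Int)
    (h : d = ((0 : Int), (-1 : Int)) ∨ d = ((1 : Int), (0 : Int)) ∨ d = ((0 : Int), (1 : Int)) ∨ d = ((-1 : Int), (0 : Int))) :
    rot d = ((0 : Int), (-1 : Int)) ∨ rot d = ((1 : Int), (0 : Int)) ∨ rot d = ((0 : Int), (1 : Int)) ∨ rot d = ((-1 : Int), (0 : Int)) := by
  rcases h with h | h | h | h <;> subst h <;> decide

lemma alt_finish (map : List (List String)) (p d : Int × Int) (dd : Int × Int)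
    (h : ([d, rot d, rot (rot d), rot (rot (rot d))].find? (fun x => !blockedB map p x)) = some dd) :
    get_new_pos_alt map p d = finish map p dd := by
  simp only [get_new_pos_alt, h, finish]

-- ===== VERDICT (by name: the statement is the Claim_ definition above) =====
theorem get_new_pos_spec : Claim_equal_get_new_pos := by
  intro map p d _ hpre
  unfold Spec_get_new_pos
  unfold get_new_pos
  by_cases h0 : blockedB map p d = true
  · rcases hpre with h | ⟨hv, hnall⟩
    · rw [h] at h0; exact (Bool.false_ne_true h0).elim
    · have htr0 := turn_right_rot d hv
      have hv1 := rot_valid d hv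
      rw [fuel_blocked 3 map p d (rot d) h0 htr0]
      by_cases h1 : blockedB map p (rot d) = true
      · have htr1 := turn_right_rot _ hv1
        have hv2 := rot_valid _ hv1
        rw [fuel_blocked 2 map p (rot d) _ h1 htr1]
        by_cases h2 : blockedB map p (rot (rot d)) = true
        · have htr2 := turn_right_rot _ hv2
          rw [fuel_blocked 1 map p (rot (rot d)) _ h2 htr2]
          have h3 : blockedB map p (rot (rot (rot d))) = false := by
            cases hb : blockedB map p (rot (rot (rot d)))
            · rfl
            · exact absurd ⟨h0, h1, h2, hb⟩ hnall
          rw [fuel_notblocked 0 map p _ h3]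
          exact (alt_finish map p d _ (by simp [List.find?, h0, h1, h2, h3])).symm
        · replace h2 : blockedB map p (rot (rot d)) = false := by
            cases hb : blockedB map p (rot (rot d)); rfl; exact absurd hb h2
          rw [fuel_notblocked 1 map p _ h2]
          exact (alt_finish map p d _ (by simp [List.find?, h0, h1, h2])).symm
      · replace h1 : blockedB map p (rot d) = false := by
          cases hb : blockedB map p (rot d); rfl; exact absurd hb h1
        rw [fuel_notblocked 2 map p _ h1]
        exact (alt_finish map p d _ (by simp [List.find?, h0, h1])).symm
  · replace h0 : blockedB map p d = false := by
      cases hb : blockedB map p d; rfl; exact absurd hb h0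
    rw [fuel_notblocked 3 map p d h0]
    exact (alt_finish map p d _ (by simp [List.find?, h0])).symm
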